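-- pv_equiv track=rewrite | github.com/Kaktycikk/obrabotka_matrix | obr_matr.py | sym_replace_area_1_and_4
-- ===== SOURCE A (Python) =====
-- def sym_replace_area_1_and_4(F, triangle_1, triangle_4):
--     N = len(F)
--     idx_1 = 0
--     idx_4 = 0
--
--     for i in range(N):
--         for j in range(N):
--             if i > j and i + j < N - 1:
--                 F[i][j] = triangle_4[idx_4]
--                 idx_4 += 1
--
--     for i in range(N):
--         for j in range(N):
--             if i > j and i + j > N - 1:
--                 F[i][j] = triangle_1[idx_1]
--                 idx_1 += 1
--
--     return F
-- ===== SOURCE B (Python) =====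
-- def sym_replace_area_1_and_4(F, triangle_1, triangle_4):
--     # Same in-place mutation of F as the original.
--     N = len(F)
--     idx_1 = 0
--     idx_4 = 0
--     for i in range(N):
--         row = F[i]
--         for j in range(min(i, N - 1 - i)):
--             row[j] = triangle_4[idx_4]
--             idx_4 += 1
--         for j in range(N - i, i):
--             row[j] = triangle_1[idx_1]
--             idx_1 += 1
--     return F
-- ===== Notes on version B (the rewrite author's own statement) =====
-- stated objective: simpler
-- what changed: Replaces the two full N*N branch-guarded scans by a single row loop that computes each row's two column spans analytically (range(min(i,N-1-i)) for region 4, range(N-i,i) for region 1) and fills both regions of the row in one pass.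
import Mathlib
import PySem

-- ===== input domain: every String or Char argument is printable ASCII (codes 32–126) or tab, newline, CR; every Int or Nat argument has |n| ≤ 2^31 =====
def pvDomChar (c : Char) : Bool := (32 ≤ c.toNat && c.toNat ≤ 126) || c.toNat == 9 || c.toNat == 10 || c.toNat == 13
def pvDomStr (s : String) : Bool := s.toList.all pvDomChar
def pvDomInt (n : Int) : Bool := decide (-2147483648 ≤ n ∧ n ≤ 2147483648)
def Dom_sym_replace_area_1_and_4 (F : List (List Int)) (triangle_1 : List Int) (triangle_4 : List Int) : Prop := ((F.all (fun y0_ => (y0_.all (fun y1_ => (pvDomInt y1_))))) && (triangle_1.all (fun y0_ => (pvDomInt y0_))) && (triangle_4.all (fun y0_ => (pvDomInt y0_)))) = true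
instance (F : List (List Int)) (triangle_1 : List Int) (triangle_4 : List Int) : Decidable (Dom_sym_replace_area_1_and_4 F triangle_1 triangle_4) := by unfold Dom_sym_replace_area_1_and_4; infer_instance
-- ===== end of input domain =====

-- B merges A's two full N×N guarded scans into one row loop with analytic column
-- spans; same return value and same in-place mutation of F (equivalence proved on
-- the return value).


-- ===== PORT A =====
-- Literal transliteration of A: two full N×N scans; each carries the matrix and
-- a running triangle index in its fold state.  Python's F[i][j] = v becomes
-- set i ((getD i []).set j v); triangle_x[idx] becomes getD idx 0 (in range on Pre_).
def sym_replace_area_1_and_4 (F : List (List Int)) (triangle_1 : List Int) (triangle_4 : List Int) : List (List Int) :=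
  let N := F.length
  let st4 := (List.range N).foldl (fun (st : List (List Int) × Nat) i =>
      (List.range N).foldl (fun (st : List (List Int) × Nat) j =>
        if i > j ∧ i + j < N - 1 then
          (st.1.set i ((st.1.getD i []).set j (triangle_4.getD st.2 0)), st.2 + 1)
        else st) st) (F, 0)
  let st1 := (List.range N).foldl (fun (st : List (List Int) × Nat) i =>
      (List.range N).foldl (fun (st : List (List Int) × Nat) j =>
        if i > j ∧ i + j > N - 1 then
          (st.1.set i ((st.1.getD i []).set j (triangle_1.getD st.2 0)), st.2 + 1)
        else st) st) (st4.1, 0)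
  st1.1

-- ===== PORT B =====
-- Literal transliteration of B: one loop over rows; per row the region-4 columns
-- range(min(i, N-1-i)) then the region-1 columns range(N-i, i) are filled from the
-- two running indices carried in the fold state.
def sym_replace_area_1_and_4_alt (F : List (List Int)) (triangle_1 : List Int) (triangle_4 : List Int) : List (List Int) :=
  let N := F.length
  let st := (List.range N).foldl (fun (st : List (List Int) × Nat × Nat) i =>
      let row := st.1.getD i []
      let r4 := (List.range (min i (N - 1 - i))).foldl
        (fun (rs : List Int × Nat) j => (rs.1.set j (triangle_4.getD rs.2 0), rs.2 + 1)) (row, st.2.2)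
      let r1 := (List.range' (N - i) (i - (N - i))).foldl
        (fun (rs : List Int × Nat) j => (rs.1.set j (triangle_1.getD rs.2 0), rs.2 + 1)) (r4.1, st.2.1)
      (st.1.set i r1.1, r1.2, r4.2)) (F, 0, 0)
  st.1

-- ===== PRECONDITION & SPEC =====
-- Pre_ is exactly where Python A returns (no IndexError): each row i is long
-- enough for all columns assigned in it, and each triangle list holds the
-- (N-1)^2/4 values consumed from it.
def Pre_sym_replace_area_1_and_4 (F : List (List Int)) (triangle_1 : List Int) (triangle_4 : List Int) : Prop :=
  (∀ i, i < F.length →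
      min i (F.length - 1 - i) ≤ (F.getD i []).length ∧
      (F.length - i < i → i ≤ (F.getD i []).length)) ∧
  (F.length - 1) ^ 2 / 4 ≤ triangle_4.length ∧
  (F.length - 1) ^ 2 / 4 ≤ triangle_1.length
instance (F : List (List Int)) (triangle_1 : List Int) (triangle_4 : List Int) : Decidable (Pre_sym_replace_area_1_and_4 F triangle_1 triangle_4) := by unfold Pre_sym_replace_area_1_and_4; infer_instance
def pvWitness_sym_replace_area_1_and_4 : List (List Int) × List Int × List Int :=
  ([[1, 2, 3], [4, 5, 6], [7, 8, 9]], [11], [12])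

def Spec_sym_replace_area_1_and_4 (F : List (List Int)) (triangle_1 : List Int) (triangle_4 : List Int) (out : List (List Int)) : Prop := out = sym_replace_area_1_and_4_alt F triangle_1 triangle_4
instance (F : List (List Int)) (triangle_1 : List Int) (triangle_4 : List Int) (out : List (List Int)) : Decidable (Spec_sym_replace_area_1_and_4 F triangle_1 triangle_4 out) := by unfold Spec_sym_replace_area_1_and_4; infer_instance

-- ===== CLAIM (what is proved, stated in full; the proofs are below) =====
def Claim_equal_sym_replace_area_1_and_4 : Prop := ∀ (F : List (List Int)) (triangle_1 : List Int) (triangle_4 : List Int), Dom_sym_replace_area_1_and_4 F triangle_1 triangle_4 → Pre_sym_replace_area_1_and_4 F triangle_1 triangle_4 → Spec_sym_replace_area_1_and_4 F triangle_1 triangle_4 (sym_replace_area_1_and_4 F triangle_1 triangle_4)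

-- ===== LEMMAS AND PROOFS =====

-- fill t s a m row : set row positions a, a+1, …, a+m-1 to t[s], t[s+1], …
def pvFill (t : List Int) : Nat → Nat → Nat → List Int → List Int
  | _, _, 0, row => row
  | s, a, m+1, row => pvFill t (s+1) (a+1) m (row.set a (t.getD s 0))

-- prefix sums of the per-row cell counts of the two regions
def pvS4 (N : Nat) : Nat → Nat
  | 0 => 0
  | i+1 => pvS4 N i + min i (N - 1 - i)
def pvS1 (N : Nat) : Nat → Nat
  | 0 => 0
  | i+1 => pvS1 N i + (i - (N - i))

-- pure per-row operations
def pvG (t4 : List Int) (N i : Nat) (F : List (List Int)) : List (List Int) :=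
  F.set i (pvFill t4 (pvS4 N i) 0 (min i (N - 1 - i)) (F.getD i []))
def pvH (t1 : List Int) (N i : Nat) (F : List (List Int)) : List (List Int) :=
  F.set i (pvFill t1 (pvS1 N i) (N - i) (i - (N - i)) (F.getD i []))

theorem pvGetD_set_self (F : List (List Int)) (i : Nat) (r : List Int) (h : i < F.length) :
    (F.set i r).getD i [] = r := by
  simp [List.getD, h]

theorem pvGetD_set_ne (F : List (List Int)) (i j : Nat) (r : List Int) (h : i ≠ j) :
    (F.set i r).getD j [] = F.getD j [] := by
  simp [List.getD, List.getElem?_set_ne h]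

-- a guarded fold is the fold over the filtered list
theorem pvFoldl_if_filter {α : Type} (l : List Nat) (p : Nat → Bool)
    (f : α → Nat → α) (init : α) :
    l.foldl (fun st j => if p j then f st j else st) init = (l.filter p).foldl f init := by
  induction l generalizing init with
  | nil => rfl
  | cons x xs ih =>
    by_cases h : p x = true <;> simp [h, ih]

-- filtering an interval predicate out of range N
theorem pvFilter_range_Ico (N a b : Nat) :
    (List.range N).filter (fun j => decide (a ≤ j ∧ j < b)) = List.range' a (min b N - a) := by
  induction N with
  | zero => simp
  | succ N ih =>
    rw [List.range_succ, List.filter_append, ih]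
    by_cases hb : N < b
    · by_cases ha : a ≤ N
      · have h1 : min b N - a + 1 = min b (N+1) - a := by omega
        have h2 : a + 1 * (min b N - a) = N := by omega
        simp only [List.filter_cons, List.filter_nil, decide_eq_true_eq]
        rw [if_pos ⟨ha, hb⟩, ← h1, List.range'_concat, h2]
      · have h1 : min b N - a = 0 := by omega
        have h2 : min b (N+1) - a = 0 := by omega
        simp only [List.filter_cons, List.filter_nil, decide_eq_true_eq]
        rw [if_neg (fun h => ha h.1)]
        simp [h1, h2]
    · have h1 : min b N = min b (N+1) := by omega
      simp [hb, h1]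

-- inner unguarded fold on a row
theorem pvRowfold (t : List Int) (m : Nat) :
    ∀ (a s : Nat) (row : List Int),
    (List.range' a m).foldl (fun (rs : List Int × Nat) j => (rs.1.set j (t.getD rs.2 0), rs.2 + 1)) (row, s)
      = (pvFill t s a m row, s + m) := by
  induction m with
  | zero => intro a s row; simp [pvFill]
  | succ m ih =>
    intro a s row
    rw [List.range'_succ]
    simp only [List.foldl_cons]
    rw [ih]
    simp [pvFill]; omega

-- inner unguarded fold acting on row i through the matrix
theorem pvRowfoldM (t : List Int) (i m : Nat) :
    ∀ (a s : Nat) (F : List (List Int)), i < F.length →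
    (List.range' a m).foldl (fun (st : List (List Int) × Nat) j =>
        (st.1.set i ((st.1.getD i []).set j (t.getD st.2 0)), st.2 + 1)) (F, s)
      = (F.set i (pvFill t s a m (F.getD i [])), s + m) := by
  induction m with
  | zero =>
    intro a s F h
    simp [pvFill, List.getD, List.getElem?_eq_getElem h, List.set_getElem_self]
  | succ m ih =>
    intro a s F hi
    rw [List.range'_succ]
    simp only [List.foldl_cons]
    rw [ih (a+1) (s+1) _ (by simpa using hi)]
    rw [pvGetD_set_self _ _ _ hi, List.set_set]
    simp [pvFill]; omega

theorem pvFoldl_length {f : List (List Int) → Nat → List (List Int)}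
    (hf : ∀ F i, (f F i).length = F.length) :
    ∀ (l : List Nat) (F : List (List Int)), (l.foldl f F).length = F.length := by
  intro l
  induction l with
  | nil => intro F; rfl
  | cons x xs ih => intro F; rw [List.foldl_cons, ih, hf]

-- pass 4 of A equals the fold of the pure row operations pvG
theorem pvPass4 (t4 : List Int) (F : List (List Int)) (N : Nat) (hN : N = F.length) :
    ∀ n, n ≤ N →
    (List.range n).foldl (fun (st : List (List Int) × Nat) i =>
      (List.range N).foldl (fun (st : List (List Int) × Nat) j =>
        if i > j ∧ i + j < N - 1 then
          (st.1.set i ((st.1.getD i []).set j (t4.getD st.2 0)), st.2 + 1)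
        else st) st) (F, 0)
      = ((List.range n).foldl (fun F i => pvG t4 N i F) F, pvS4 N n) := by
  intro n hn
  induction n with
  | zero => simp [pvS4]
  | succ n ih =>
    rw [List.range_succ, List.foldl_append, List.foldl_append, ih (by omega)]
    simp only [List.foldl_cons, List.foldl_nil]
    set G := (List.range n).foldl (fun F i => pvG t4 N i F) F with hG
    have hGlen : G.length = F.length := pvFoldl_length (fun F i => by simp [pvG]) _ _
    have hguard : ∀ j ∈ List.range N,
        (decide (n > j ∧ n + j < N - 1)) = (decide (0 ≤ j ∧ j < min n (N - 1 - n))) := by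
      intro j hj
      simp only [decide_eq_decide]
      omega
    rw [show (fun (st : List (List Int) × Nat) j =>
        if n > j ∧ n + j < N - 1 then
          (st.1.set n ((st.1.getD n []).set j (t4.getD st.2 0)), st.2 + 1)
        else st) = (fun (st : List (List Int) × Nat) j =>
        if decide (n > j ∧ n + j < N - 1) = true then
          (st.1.set n ((st.1.getD n []).set j (t4.getD st.2 0)), st.2 + 1)
        else st) from by funext st j; simp]
    rw [pvFoldl_if_filter, List.filter_congr hguard, pvFilter_range_Ico]
    have hmin : min (min n (N - 1 - n)) N - 0 = min n (N - 1 - n) := by omega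
    rw [hmin, pvRowfoldM t4 n _ 0 (pvS4 N n) G (by omega)]
    simp [pvG, pvS4, hG]
  
-- pass 1 of A equals the fold of the pure row operations pvH
theorem pvPass1 (t1 : List Int) (F : List (List Int)) (N : Nat) (hN : N = F.length) :
    ∀ n, n ≤ N →
    (List.range n).foldl (fun (st : List (List Int) × Nat) i =>
      (List.range N).foldl (fun (st : List (List Int) × Nat) j =>
        if i > j ∧ i + j > N - 1 then
          (st.1.set i ((st.1.getD i []).set j (t1.getD st.2 0)), st.2 + 1)
        else st) st) (F, 0)
      = ((List.range n).foldl (fun F i => pvH t1 N i F) F, pvS1 N n) := by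
  intro n hn
  induction n with
  | zero => simp [pvS1]
  | succ n ih =>
    rw [List.range_succ, List.foldl_append, List.foldl_append, ih (by omega)]
    simp only [List.foldl_cons, List.foldl_nil]
    set G := (List.range n).foldl (fun F i => pvH t1 N i F) F with hG
    have hGlen : G.length = F.length := pvFoldl_length (fun F i => by simp [pvH]) _ _
    have hguard : ∀ j ∈ List.range N,
        (decide (n > j ∧ n + j > N - 1)) = (decide (N - n ≤ j ∧ j < n)) := by
      intro j hj
      simp only [List.mem_range] at hj
      simp only [decide_eq_decide]
      omega
    rw [show (fun (st : List (List Int) × Nat) j =>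
        if n > j ∧ n + j > N - 1 then
          (st.1.set n ((st.1.getD n []).set j (t1.getD st.2 0)), st.2 + 1)
        else st) = (fun (st : List (List Int) × Nat) j =>
        if decide (n > j ∧ n + j > N - 1) = true then
          (st.1.set n ((st.1.getD n []).set j (t1.getD st.2 0)), st.2 + 1)
        else st) from by funext st j; simp]
    rw [pvFoldl_if_filter, List.filter_congr hguard, pvFilter_range_Ico]
    have hmin : min n N - (N - n) = n - (N - n) := by omega
    rw [hmin, pvRowfoldM t1 n _ (N - n) (pvS1 N n) G (by omega)]
    simp [pvH, pvS1, hG]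

-- B equals the merged fold of pvH ∘ pvG
theorem pvBfold (t1 t4 : List Int) (F : List (List Int)) (N : Nat) (hN : N = F.length) :
    ∀ n, n ≤ N →
    (List.range n).foldl (fun (st : List (List Int) × Nat × Nat) i =>
      let row := st.1.getD i []
      let r4 := (List.range (min i (N - 1 - i))).foldl
        (fun (rs : List Int × Nat) j => (rs.1.set j (t4.getD rs.2 0), rs.2 + 1)) (row, st.2.2)
      let r1 := (List.range' (N - i) (i - (N - i))).foldl
        (fun (rs : List Int × Nat) j => (rs.1.set j (t1.getD rs.2 0), rs.2 + 1)) (r4.1, st.2.1)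
      (st.1.set i r1.1, r1.2, r4.2)) (F, 0, 0)
      = ((List.range n).foldl (fun F i => pvH t1 N i (pvG t4 N i F)) F, pvS1 N n, pvS4 N n) := by
  intro n hn
  induction n with
  | zero => simp [pvS1, pvS4]
  | succ n ih =>
    rw [List.range_succ, List.foldl_append, List.foldl_append, ih (by omega)]
    simp only [List.foldl_cons, List.foldl_nil]
    set G := (List.range n).foldl (fun F i => pvH t1 N i (pvG t4 N i F)) F with hG
    have hGlen : G.length = F.length :=
      pvFoldl_length (fun F i => by simp [pvH, pvG]) _ _
    rw [List.range_eq_range', pvRowfold, pvRowfold]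
    simp only [pvH, pvG]
    rw [pvGetD_set_self _ _ _ (by omega), List.set_set]
    simp [pvS1, pvS4]
  
-- pvH on an earlier row commutes with pvG on a later (different) row
theorem pvComm (t1 t4 : List Int) (N i j : Nat) (hij : i ≠ j) (F : List (List Int)) :
    pvH t1 N i (pvG t4 N j F) = pvG t4 N j (pvH t1 N i F) := by
  unfold pvH pvG
  rw [pvGetD_set_ne _ _ _ _ (fun h => hij h.symm), pvGetD_set_ne _ _ _ _ hij,
    List.set_comm _ _ hij]

-- pushing one pvG past a prefix of pvH's
theorem pvPush (t1 t4 : List Int) (N j : Nat) :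
    ∀ n, n ≤ j → ∀ F,
    (List.range n).foldl (fun F i => pvH t1 N i F) (pvG t4 N j F)
      = pvG t4 N j ((List.range n).foldl (fun F i => pvH t1 N i F) F) := by
  intro n hn
  induction n with
  | zero => intro F; simp
  | succ n ih =>
    intro F
    rw [List.range_succ, List.foldl_append, List.foldl_append]
    simp only [List.foldl_cons, List.foldl_nil]
    rw [ih (by omega), pvComm _ _ _ _ _ (by omega)]

-- the interchange: pass-then-pass equals the merged single pass
theorem pvInterchange (t1 t4 : List Int) (N : Nat) :
    ∀ n, ∀ F,
    (List.range n).foldl (fun F i => pvH t1 N i F)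
        ((List.range n).foldl (fun F i => pvG t4 N i F) F)
      = (List.range n).foldl (fun F i => pvH t1 N i (pvG t4 N i F)) F := by
  intro n
  induction n with
  | zero => intro F; rfl
  | succ n ih =>
    intro F
    rw [List.range_succ, List.foldl_append, List.foldl_append, List.foldl_append]
    simp only [List.foldl_cons, List.foldl_nil]
    rw [pvPush t1 t4 N n n (le_refl n), ih]

-- ===== VERDICT (by name: the statement is the Claim_ definition above) =====
theorem sym_replace_area_1_and_4_spec : Claim_equal_sym_replace_area_1_and_4 := by
  intro F t1 t4 _ _
  unfold Spec_sym_replace_area_1_and_4 sym_replace_area_1_and_4 sym_replace_area_1_and_4_alt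
  simp only
  rw [pvPass4 t4 F F.length rfl F.length (le_refl _)]
  dsimp only
  have hlen : ((List.range F.length).foldl (fun G i => pvG t4 F.length i G) F).length = F.length :=
    pvFoldl_length (fun F i => by simp [pvG]) _ _
  rw [pvPass1 t1 ((List.range F.length).foldl (fun G i => pvG t4 F.length i G) F) F.length hlen.symm F.length (le_refl _)]
  rw [pvBfold t1 t4 F F.length rfl F.length (le_refl _)]
  dsimp only
  rw [pvInterchange]
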